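-- pv_equiv track=rewrite | github.com/ApartsinProjects/EMR-ACH | src/common/cc_news_domains.py | host_in_whitelist
-- ===== SOURCE A (Python) =====
-- from typing import Iterable
--
-- def _normalize_host(host: str) -> str:
--     host = host.strip().lower()
--     if host.startswith("www."):
--         host = host[4:]
--     return host
--
-- def host_in_whitelist(host: str, whitelist: Iterable[str]) -> bool:
--     """Return True if ``host`` or any of its parent domains is in the set.
--
--     Example: ``edition.cnn.com`` is accepted if ``cnn.com`` is whitelisted.
--     """
--     if not host:
--         return False
--     host = _normalize_host(host)
--     wl = set(whitelist)
--     if host in wl: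
--         return True
--     parts = host.split(".")
--     for i in range(1, len(parts) - 1):
--         if ".".join(parts[i:]) in wl:
--             return True
--     return False
-- ===== SOURCE B (Python) =====
-- def host_in_whitelist(host, whitelist):
--     """Return True if ``host`` or any of its parent domains is whitelisted.
--
--     Single pass over the whitelist: an entry matches if it equals the
--     normalized host, or (when it has at least two labels, i.e. contains a
--     dot) if it is a dot-aligned proper suffix of the host.
--     """
--     if not host:
--         return False
--     h = host.strip().lower()
--     if h.startswith("www."):
--         h = h[4:]
--     for w in whitelist:
--         if w == h or ("." in w and h.endswith("." + w)):
--             return True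
--     return False
-- ===== Notes on version B (the rewrite author's own statement) =====
-- stated objective: simpler
-- what changed: Instead of building a set of the whitelist and enumerating every parent-domain string of the host for membership, B makes one pass over the whitelist and accepts an entry that equals the normalized host or is a dot-aligned suffix of it containing a dot.
import Mathlib
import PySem

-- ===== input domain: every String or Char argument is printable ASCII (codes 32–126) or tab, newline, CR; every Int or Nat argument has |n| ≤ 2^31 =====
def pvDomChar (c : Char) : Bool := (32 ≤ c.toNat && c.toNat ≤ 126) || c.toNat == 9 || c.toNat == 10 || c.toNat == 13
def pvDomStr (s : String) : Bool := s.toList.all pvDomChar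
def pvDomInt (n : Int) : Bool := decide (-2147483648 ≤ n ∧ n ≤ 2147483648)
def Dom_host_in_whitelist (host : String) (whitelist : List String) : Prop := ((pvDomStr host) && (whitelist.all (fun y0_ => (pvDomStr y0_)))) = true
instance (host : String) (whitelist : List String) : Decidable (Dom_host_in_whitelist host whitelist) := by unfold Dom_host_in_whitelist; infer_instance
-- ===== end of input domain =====

-- B replaces A's enumeration of the host's parent-domain strings checked against a set by a
-- single scan of the whitelist testing equality or a dot-aligned multi-label suffix (objective: simpler).

-- ===== PORT A =====
-- helper `_normalize_host`
def pvNormalizeHost (host : String) : String :=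
  let h0 := PySem.Str.lower (PySem.Str.strip host)
  let h := if PySem.Str.startswith h0 "www." then PySem.Str.slice h0 (some 4) none else h0
  h

def host_in_whitelist (host : String) (whitelist : List String) : Bool :=
  if host = "" then false  -- `if not host: return False`
  else
    let h := pvNormalizeHost host
    let wl := PySem.Set.ofList whitelist
    if h ∈ wl then true
    else
      match PySem.Str.split? h "." with  -- host.split("."); the separator "." is nonempty, so never `none`
      | none => false
      | some parts =>
        (PySem.List.pyRange 1 ((parts.length : Int) - 1)).any
          (fun i => decide (PySem.Str.join "." (PySem.List.slice parts (some i) none) ∈ wl))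

-- ===== PORT B =====
def host_in_whitelist_alt (host : String) (whitelist : List String) : Bool :=
  if host = "" then false
  else
    let h0 := PySem.Str.lower (PySem.Str.strip host)
    let h := if PySem.Str.startswith h0 "www." then PySem.Str.slice h0 (some 4) none else h0
    -- `h.endswith("." + w)` ported at the char level: ("." + w).toList = '.' :: w.toList (exact)
    whitelist.any (fun w =>
      (w == h) || (PySem.Str.isIn "." w && PySem.Chars.endswith h.toList ('.' :: w.toList)))

-- ===== PRECONDITION & SPEC =====
def Spec_host_in_whitelist (host : String) (whitelist : List String) (out : Bool) : Prop := out = host_in_whitelist_alt host whitelist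
instance (host : String) (whitelist : List String) (out : Bool) : Decidable (Spec_host_in_whitelist host whitelist out) := by unfold Spec_host_in_whitelist; infer_instance

-- ===== CLAIM (what is proved, stated in full; the proofs are below) =====
def Claim_equal_host_in_whitelist : Prop := ∀ (host : String) (whitelist : List String), Dom_host_in_whitelist host whitelist → Spec_host_in_whitelist host whitelist (host_in_whitelist host whitelist)

-- ===== LEMMAS AND PROOFS =====

-- Structural specification of Python's `split` on the one-character separator ".".
def pvSp : List Char → List (List Char)
  | [] => [[]]
  | c :: t => if c = '.' then [] :: pvSp t else (pvSp t).modifyHead (c :: ·)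

theorem pvSp_length_pos (cs : List Char) : 0 < (pvSp cs).length := by
  induction cs with
  | nil => simp [pvSp]
  | cons c t ih => by_cases hc : c = '.' <;> simp [pvSp, hc, ih]

theorem pvSp_ne_nil (cs : List Char) : pvSp cs ≠ [] := by
  have := pvSp_length_pos cs
  intro h; rw [h] at this; simp at this

theorem pvSp_go_spec (fuel : Nat) : ∀ (l cur : List Char) (acc : List (List Char)),
    l.length < fuel →
    PySem.Chars.splitOn.go ['.'] fuel l cur acc = acc.reverse ++ (pvSp l).modifyHead (cur.reverse ++ ·) := by
  induction fuel with
  | zero => intro l cur acc h; omega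
  | succ f ih =>
    intro l cur acc h
    cases l with
    | nil => simp [PySem.Chars.splitOn.go, pvSp]
    | cons c rest =>
      by_cases hc : c = '.'
      · subst hc
        rw [show PySem.Chars.splitOn.go ['.'] (f+1) ('.' :: rest) cur acc
              = PySem.Chars.splitOn.go ['.'] f rest [] (cur.reverse :: acc) from by
            simp [PySem.Chars.splitOn.go, List.isPrefixOf]]
        rw [ih rest [] (cur.reverse :: acc) (by simpa using Nat.lt_of_succ_lt_succ h)]
        rcases hsp : pvSp rest with _ | ⟨p, ps⟩
        · exact absurd hsp (pvSp_ne_nil rest)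
        · simp [pvSp, hsp, List.modifyHead]
      · rw [show PySem.Chars.splitOn.go ['.'] (f+1) (c :: rest) cur acc
              = PySem.Chars.splitOn.go ['.'] f rest (c :: cur) acc from by
            simp [PySem.Chars.splitOn.go, List.isPrefixOf, Ne.symm hc]]
        rw [ih rest (c :: cur) acc (by simpa using Nat.lt_of_succ_lt_succ h)]
        rcases hsp : pvSp rest with _ | ⟨p, ps⟩
        · exact absurd hsp (pvSp_ne_nil rest)
        · simp [pvSp, hsp, hc, List.modifyHead]

theorem pvSplitOn_eq_sp (cs : List Char) : PySem.Chars.splitOn cs ['.'] = pvSp cs := by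
  rw [PySem.Chars.splitOn, pvSp_go_spec (cs.length + 1) cs [] [] (by omega)]
  rcases hsp : pvSp cs with _ | ⟨p, ps⟩
  · exact absurd hsp (pvSp_ne_nil cs)
  · simp [List.modifyHead]

theorem pvJoin_cons_head (sep p : List Char) (c : Char) (ps : List (List Char)) :
    PySem.Chars.join sep ((c :: p) :: ps) = c :: PySem.Chars.join sep (p :: ps) := by
  cases ps with
  | nil => simp [PySem.Chars.join_singleton]
  | cons q r => simp [PySem.Chars.join_cons_cons]

theorem pvJoin_sp (cs : List Char) : PySem.Chars.join ['.'] (pvSp cs) = cs := by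
  induction cs with
  | nil => simp [pvSp, PySem.Chars.join_singleton]
  | cons c t ih =>
    rcases hsp : pvSp t with _ | ⟨p, ps⟩
    · exact absurd hsp (pvSp_ne_nil t)
    by_cases hc : c = '.'
    · subst hc
      rw [show pvSp ('.' :: t) = [] :: p :: ps from by simp [pvSp, hsp],
          PySem.Chars.join_cons_cons]
      simp [← hsp, ih]
    · rw [show pvSp (c :: t) = (c :: p) :: ps from by simp [pvSp, hc, hsp, List.modifyHead],
          pvJoin_cons_head]
      rw [← hsp, ih]

theorem pvSp_append (a b : List Char) : pvSp (a ++ '.' :: b) = pvSp a ++ pvSp b := by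
  induction a with
  | nil => simp [pvSp]
  | cons c t ih =>
    by_cases hc : c = '.'
    · simp [pvSp, hc, ih]
    · rcases hsp : pvSp t with _ | ⟨p, ps⟩
      · exact absurd hsp (pvSp_ne_nil t)
      simp [pvSp, hc, ih, hsp, List.modifyHead]

theorem pvSp_two_le_iff (cs : List Char) : 2 ≤ (pvSp cs).length ↔ '.' ∈ cs := by
  induction cs with
  | nil => simp [pvSp]
  | cons c t ih =>
    by_cases hc : c = '.'
    · subst hc
      have := pvSp_length_pos t
      simp [pvSp]; omega
    · simp [pvSp, hc, ih, Ne.symm hc]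

theorem pvJoin_append (as bs : List (List Char)) (ha : as ≠ []) (hb : bs ≠ []) :
    PySem.Chars.join ['.'] (as ++ bs) = PySem.Chars.join ['.'] as ++ '.' :: PySem.Chars.join ['.'] bs := by
  induction as with
  | nil => exact absurd rfl ha
  | cons a as' ih =>
    cases as' with
    | nil =>
      rcases bs with _ | ⟨b, bs'⟩
      · exact absurd rfl hb
      · simp [PySem.Chars.join_cons_cons, PySem.Chars.join_singleton]
    | cons a2 as'' =>
      have ih' := ih (by simp)
      rw [show (a2 :: as'') ++ bs = a2 :: (as'' ++ bs) from rfl] at ih'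
      rw [show (a :: a2 :: as'') ++ bs = a :: a2 :: (as'' ++ bs) from rfl,
          PySem.Chars.join_cons_cons, ih', PySem.Chars.join_cons_cons]
      simp

theorem pvParents_iff (H w : List Char) :
    (∃ k : Nat, 1 ≤ k ∧ k + 1 < (pvSp H).length ∧ PySem.Chars.join ['.'] ((pvSp H).drop k) = w)
    ↔ ('.' ∈ w ∧ ('.' :: w) <:+ H) := by
  constructor
  · rintro ⟨k, hk1, hk2, rfl⟩
    have hlen : k < (pvSp H).length := by omega
    have hdropnn : (pvSp H).drop k ≠ [] := by
      intro hnil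
      have := List.length_drop (l := pvSp H) (i := k)
      rw [hnil] at this; simp at this; omega
    have hdrop2 : 2 ≤ ((pvSp H).drop k).length := by
      rw [List.length_drop]; omega
    rcases hd : (pvSp H).drop k with _ | ⟨x, xs⟩
    · exact absurd hd hdropnn
    rcases xs with _ | ⟨y, r⟩
    · rw [hd] at hdrop2; simp at hdrop2
    constructor
    · rw [PySem.Chars.join_cons_cons]; simp
    · have htake : (pvSp H).take k ≠ [] := by
        intro hnil
        have : ((pvSp H).take k).length = min k (pvSp H).length := List.length_take
        rw [hnil] at this; simp at this; omega
      have hHeq : H = PySem.Chars.join ['.'] ((pvSp H).take k ++ (pvSp H).drop k) := by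
        rw [List.take_append_drop, pvJoin_sp]
      rw [pvJoin_append _ _ htake hdropnn, hd] at hHeq
      exact ⟨PySem.Chars.join ['.'] ((pvSp H).take k), hHeq.symm⟩
  · rintro ⟨hdot, u, hu⟩
    refine ⟨(pvSp u).length, pvSp_length_pos u, ?_, ?_⟩
    · rw [← hu, pvSp_append]
      have h2 : 2 ≤ (pvSp w).length := (pvSp_two_le_iff w).mpr hdot
      rw [List.length_append]; omega
    · rw [← hu, pvSp_append, List.drop_left, pvJoin_sp]

theorem pvJoinDrop_toList (h : String) (k : Nat) :
    (PySem.Str.join "." ((List.map String.ofList (pvSp h.toList)).drop k)).toList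
      = PySem.Chars.join ['.'] ((pvSp h.toList).drop k) := by
  rw [PySem.Str.toList_join, ← List.map_drop]
  have hdot : ("." : String).toList = ['.'] := by decide
  simp [List.map_map, Function.comp_def, String.toList_ofList, hdot]

theorem pvMainCore (h : String) (wl : List String) :
    (if h ∈ PySem.Set.ofList wl then true
     else
       match PySem.Str.split? h "." with
       | none => false
       | some parts =>
         (PySem.List.pyRange 1 ((parts.length : Int) - 1)).any
           (fun i => decide (PySem.Str.join "." (PySem.List.slice parts (some i) none) ∈ PySem.Set.ofList wl)))
    = wl.any (fun w =>
        (w == h) || (PySem.Str.isIn "." w && PySem.Chars.endswith h.toList ('.' :: w.toList))) := by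
  have hsplit : PySem.Str.split? h "." = some (List.map String.ofList (pvSp h.toList)) := by
    simp [PySem.Str.split?, PySem.Chars.split?, pvSplitOn_eq_sp]
  rw [hsplit, Bool.eq_iff_iff]
  have hdotw : ("." : String).toList = ['.'] := by decide
  constructor
  · intro hL
    rw [List.any_eq_true]
    by_cases hin : h ∈ PySem.Set.ofList wl
    · exact ⟨h, (PySem.Set.mem_ofList wl h).1 hin, by simp⟩
    · rw [if_neg hin, List.any_eq_true] at hL
      obtain ⟨i, hiR, hitest⟩ := hL
      rw [PySem.List.mem_pyRange_one] at hiR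
      obtain ⟨hi1, hi2⟩ := hiR
      rw [decide_eq_true_eq, PySem.List.slice_from _ (by omega), PySem.Set.mem_ofList] at hitest
      have hklen : i.toNat + 1 < (pvSp h.toList).length := by
        rw [List.length_map] at hi2; omega
      have hpar := (pvParents_iff h.toList _).mp
        ⟨i.toNat, by omega, hklen, (pvJoinDrop_toList h i.toNat).symm⟩
      refine ⟨_, hitest, ?_⟩
      rw [Bool.or_eq_true, Bool.and_eq_true]
      refine Or.inr ⟨?_, ?_⟩
      · rw [PySem.Str.isIn_eq, hdotw, PySem.Chars.isIn_iff_infix]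
        obtain ⟨s, t, hst⟩ := List.append_of_mem hpar.1
        exact ⟨s, t, by rw [hst]; simp⟩
      · rw [PySem.Chars.endswith_iff]
        exact hpar.2
  · intro hR
    rw [List.any_eq_true] at hR
    obtain ⟨w, hw, hpred⟩ := hR
    rw [Bool.or_eq_true, beq_iff_eq, Bool.and_eq_true] at hpred
    rcases hpred with rfl | ⟨hisin, hend⟩
    · rw [if_pos ((PySem.Set.mem_ofList wl w).2 hw)]
    · by_cases hin : h ∈ PySem.Set.ofList wl
      · rw [if_pos hin]
      rw [if_neg hin, List.any_eq_true]
      rw [PySem.Str.isIn_eq, hdotw, PySem.Chars.isIn_iff_infix] at hisin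
      rw [PySem.Chars.endswith_iff] at hend
      have hdotmem : '.' ∈ w.toList := List.singleton_sublist.mp hisin.sublist
      obtain ⟨k, hk1, hklen, hjoin⟩ := (pvParents_iff h.toList w.toList).mpr ⟨hdotmem, hend⟩
      refine ⟨(k : Int), ?_, ?_⟩
      · rw [PySem.List.mem_pyRange_one]
        rw [List.length_map]
        constructor
        · exact_mod_cast hk1
        · omega
      · rw [decide_eq_true_eq, PySem.List.slice_from _ (by positivity), Int.toNat_natCast,
            PySem.Set.mem_ofList]
        have : (PySem.Str.join "." ((List.map String.ofList (pvSp h.toList)).drop k)) = w :=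
          String.toList_inj.mp (by rw [pvJoinDrop_toList, hjoin])
        rw [this]; exact hw

-- ===== VERDICT (by name: the statement is the Claim_ definition above) =====
theorem host_in_whitelist_spec : Claim_equal_host_in_whitelist := by
  intro host wl _
  show host_in_whitelist host wl = host_in_whitelist_alt host wl
  unfold host_in_whitelist host_in_whitelist_alt pvNormalizeHost
  by_cases hh : host = ""
  · simp [hh]
  · simp only [if_neg hh]
    exact pvMainCore _ wl
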